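-- pv_equiv track=rewrite | github.com/RoidSec/Study | Python/Assignment/Finals/Question6.py | remove_odd
-- ===== SOURCE A (Python) =====
-- def remove_odd(sentence):
--     string = sentence
--     string = list(string)
--     for i in range(0, len(string)):
--         if i % 2 == 0:
--             pass
--         else:
--             string[i] = string[i].replace("$", "")
--
--     new_string = ""
--     for ele in string:
--         new_string += ele
--     return new_string
-- ===== SOURCE B (Python) =====
-- def remove_odd(sentence):
--     # One pass with a one-character pending buffer: characters at even indices
--     # are held, and each following odd-index character is appended unless it
--     # is '$'; pieces are joined once at the end.
--     pieces = []
--     pending = ""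
--     for c in sentence:
--         if pending:
--             pieces.append(pending if c == "$" else pending + c)
--             pending = ""
--         else:
--             pending = c
--     if pending:
--         pieces.append(pending)
--     return "".join(pieces)
-- ===== Notes on version B (the rewrite author's own statement) =====
-- stated objective: alternative
-- what changed: A materialises the string as a list, rewrites odd positions in place via str.replace over an index loop and re-concatenates with repeated +=; B makes one pass over the characters with a pending even-index buffer, emitting pairs (dropping an odd-index '$') and joining the pieces once.
import Mathlib
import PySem

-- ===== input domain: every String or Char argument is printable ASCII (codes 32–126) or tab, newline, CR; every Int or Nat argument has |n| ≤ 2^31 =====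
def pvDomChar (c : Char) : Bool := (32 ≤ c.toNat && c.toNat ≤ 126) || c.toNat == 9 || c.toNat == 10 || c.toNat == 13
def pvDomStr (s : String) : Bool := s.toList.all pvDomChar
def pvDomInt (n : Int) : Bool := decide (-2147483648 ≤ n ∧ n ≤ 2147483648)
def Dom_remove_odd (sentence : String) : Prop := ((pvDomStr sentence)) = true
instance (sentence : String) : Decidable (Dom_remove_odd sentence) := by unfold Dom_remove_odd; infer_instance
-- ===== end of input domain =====

-- B replaces A's index loop with in-place str.replace and repeated += by a single
-- pass carrying a pending even-index character, joining the pieces once (objective: alternative).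


-- ===== PORT A =====
-- A's `string = list(sentence)` is a Python list of 1-character strings, two of whose
-- entries `replace` may turn into "": modelled as List (List Char).
def pvStepA (st : List (List Char)) (i : Int) : List (List Char) :=
  if PySem.Int.mod i 2 = 0 then st
  else st.set i.toNat (PySem.Chars.replace (st.getD i.toNat []) ['$'] [])

def remove_odd (sentence : String) : String :=
  let string := sentence.toList.map (fun c => [c])
  let string := (PySem.List.pyRange 0 (string.length : Int) 1).foldl pvStepA string
  -- new_string = ""; for ele in string: new_string += ele
  String.mk (string.foldl (fun acc ele => acc ++ ele) [])

-- ===== PORT B =====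
-- state = (pieces, pending); Python's truthiness test `if pending:` is `pending ≠ []`
def pvStepB (st : List (List Char) × List Char) (c : Char) : List (List Char) × List Char :=
  if st.2 ≠ [] then
    (st.1 ++ [if c = '$' then st.2 else st.2 ++ [c]], [])
  else (st.1, [c])

def remove_odd_alt (sentence : String) : String :=
  let r := sentence.toList.foldl pvStepB ([], [])
  let pieces := if r.2 ≠ [] then r.1 ++ [r.2] else r.1
  String.mk (PySem.Chars.join [] pieces)   -- "".join(pieces)

-- ===== PRECONDITION & SPEC =====
def Spec_remove_odd (sentence : String) (out : String) : Prop := out = remove_odd_alt sentence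
instance (sentence : String) (out : String) : Decidable (Spec_remove_odd sentence out) := by unfold Spec_remove_odd; infer_instance

-- ===== CLAIM (what is proved, stated in full; the proofs are below) =====
def Claim_equal_remove_odd : Prop := ∀ (sentence : String), Dom_remove_odd sentence → Spec_remove_odd sentence (remove_odd sentence)

-- ===== LEMMAS AND PROOFS =====

-- the common result, two characters at a time
def pvChunks : List Char → List (List Char)
  | [] => []
  | [e] => [[e]]
  | e :: o :: rest => (if o = '$' then [e] else [e, o]) :: pvChunks rest

-- what A's index loop does from position k on
def pvMapOdd : Nat → List (List Char) → List (List Char)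
  | _, [] => []
  | k, e :: rest => (if k % 2 = 0 then e else PySem.Chars.replace e ['$'] []) :: pvMapOdd (k+1) rest

lemma pvMapOdd_parity (l : List (List Char)) : ∀ k, pvMapOdd (k+2) l = pvMapOdd k l := by
  induction l with
  | nil => intro k; rfl
  | cons e rest ih =>
      intro k
      simp [pvMapOdd, Nat.add_mod_right, ih (k+1)]

lemma pvStepA_loop (m : Nat) : ∀ (k : Nat) (st : List (List Char)), st.length = k + m →
    (PySem.List.pyRange (k : Int) ((k + m : Nat) : Int) 1).foldl pvStepA st
      = st.take k ++ pvMapOdd k (st.drop k) := by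
  induction m with
  | zero =>
      intro k st hlen
      have h1 : st.take k = st := List.take_of_length_le (by omega)
      have h2 : st.drop k = [] := List.drop_eq_nil_of_le (by omega)
      rw [PySem.List.pyRange_one_eq_nil (by push_cast; omega)]
      simp [h1, h2, pvMapOdd]
  | succ m ih =>
      intro k st hlen
      have hk : k < st.length := by omega
      rw [PySem.List.pyRange_one_cons (by push_cast; omega)]
      have hget : st.getD k [] = st[k] := List.getD_eq_getElem st [] hk
      have hdrop : st.drop k = st[k] :: st.drop (k+1) := List.drop_eq_getElem_cons hk
      simp only [List.foldl_cons]
      have hmod : PySem.Int.mod (k : Int) 2 = ((k % 2 : Nat) : Int) := by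
        exact_mod_cast PySem.Int.mod_natCast k 2
      by_cases hpar : k % 2 = 0
      · have hstep : pvStepA st (k : Int) = st := by
          unfold pvStepA
          rw [hmod, if_pos (by exact_mod_cast hpar)]
        rw [hstep]
        have hc1 : ((k : Int) + 1) = ((k + 1 : Nat) : Int) := by push_cast; ring
        have harg : ((k + (m+1) : Nat) : Int) = (((k+1) + m : Nat) : Int) := by push_cast; ring
        rw [hc1, harg, ih (k+1) st (by omega), hdrop]
        have hmo : pvMapOdd k (st[k] :: st.drop (k+1)) = st[k] :: pvMapOdd (k+1) (st.drop (k+1)) := by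
          simp [pvMapOdd, hpar]
        rw [hmo, List.take_add_one, List.getElem?_eq_getElem hk, List.append_assoc]
        rfl
      · set e' := PySem.Chars.replace st[k] ['$'] [] with he'
        have hstep : pvStepA st (k : Int) = st.take k ++ e' :: st.drop (k+1) := by
          unfold pvStepA
          rw [hmod, if_neg (by exact_mod_cast hpar), Int.toNat_natCast, hget,
            List.set_eq_take_append_cons_drop, if_pos hk]
        rw [hstep]
        have hc1 : ((k : Int) + 1) = ((k + 1 : Nat) : Int) := by push_cast; ring
        rw [hc1]
        have harg : ((k + (m+1) : Nat) : Int) = (((k+1) + m : Nat) : Int) := by push_cast; ring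
        have hlen' : (st.take k ++ e' :: st.drop (k+1)).length = (k+1) + m := by
          simp [List.length_take]; omega
        rw [harg, ih (k+1) _ hlen']
        have hlk : (st.take k).length = k := by simp [List.length_take]; omega
        have htk : (st.take k ++ e' :: st.drop (k+1)).take (k+1) = st.take k ++ [e'] := by
          rw [List.take_append]; simp [hlk]
        have hdk : (st.take k ++ e' :: st.drop (k+1)).drop (k+1) = st.drop (k+1) := by
          rw [List.drop_append]; simp [hlk]
        rw [htk, hdk, hdrop]
        simp [pvMapOdd, hpar, he']

lemma pvReplace_single (o : Char) : PySem.Chars.replace [o] ['$'] [] = if o = '$' then [] else [o] := by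
  by_cases h : o = '$'
  · subst h; decide
  · simp [PySem.Chars.replace, PySem.Chars.replace.go, Ne.symm h, h]

lemma pvMapOdd_flatten (cs : List Char) :
    (pvMapOdd 0 (cs.map (fun c => [c]))).flatten = (pvChunks cs).flatten := by
  induction cs using pvChunks.induct with
  | case1 => rfl
  | case2 e => rfl
  | case3 e o rest ih =>
      simp only [List.map_cons, pvMapOdd, pvChunks]
      have hpar2 := pvMapOdd_parity (rest.map (fun c => [c])) 0
      norm_num at hpar2 ⊢
      rw [hpar2, ih, pvReplace_single]
      split_ifs <;> simp

lemma pvStepB_loop (cs : List Char) : ∀ (acc : List (List Char)),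
    (let r := cs.foldl pvStepB (acc, []);
     if r.2 ≠ [] then r.1 ++ [r.2] else r.1) = acc ++ pvChunks cs := by
  induction cs using pvChunks.induct with
  | case1 => intro acc; simp [pvChunks]
  | case2 e => intro acc; simp [pvStepB, pvChunks]
  | case3 e o rest ih =>
      intro acc
      show (let r := (e :: o :: rest).foldl pvStepB (acc, []);
            if r.2 ≠ [] then r.1 ++ [r.2] else r.1) = _
      simp only [List.foldl_cons]
      have h1 : pvStepB (acc, []) e = (acc, [e]) := by simp [pvStepB]
      have h2 : pvStepB (acc, [e]) o
          = (acc ++ [if o = '$' then [e] else [e, o]], []) := by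
        by_cases h : o = '$' <;> simp [pvStepB, h]
      rw [h1, h2, ih]
      simp [pvChunks]

lemma pvJoin_nil (l : List (List Char)) : PySem.Chars.join [] l = l.flatten := by
  induction l with
  | nil => rfl
  | cons x xs ih => cases xs <;> simp_all [PySem.Chars.join, List.intercalate]

lemma pvFoldl_append (l : List (List Char)) :
    l.foldl (fun acc ele => acc ++ ele) ([] : List Char) = l.flatten := by
  simpa using PySem.List.foldl_append_eq_flatMap (fun x => x) l ([] : List Char)

-- ===== VERDICT (by name: the statement is the Claim_ definition above) =====
theorem remove_odd_spec : Claim_equal_remove_odd := by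
  intro sentence _
  simp only [Spec_remove_odd, remove_odd, remove_odd_alt]
  set cs := sentence.toList with hcs
  have hA := pvStepA_loop (cs.map (fun c => [c])).length 0 (cs.map (fun c => [c])) (by omega)
  simp only [Nat.zero_add, Nat.cast_zero] at hA
  rw [hA]
  have hB := pvStepB_loop cs []
  simp only at hB
  rw [hB, pvJoin_nil, pvFoldl_append]
  simp only [List.take_zero, List.drop_zero, List.nil_append]
  rw [pvMapOdd_flatten]
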